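-- pv_equiv track=rewrite | github.com/allendavis-developer/CG_SUITE_V2 | pricing/utils/cashconverters_filters.py | resolve_cashconverters_category
-- ===== SOURCE A (Python) =====
-- CASH_CONVERTERS_CATEGORY_MAP = {
--     "phones": "9355",
--     "games": "139973",
--     "tablets": "58058",
--     "laptops": "175672",
--     "gaming consoles": "139971",
--     "guitars & basses": "3858",
--     "smartphones and mobile": "9355",
--     "games (discs & cartridges)": "139973",
--     "cameras": "31388",
--     "headphones": "15052",
--     "smartwatches": "178893",
-- }
--
-- def resolve_cashconverters_category(category_path):
--     """
--     Finds the most specific Cash Converters category ID by checking path items from right-to-left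
--
--     Args:
--         category_path: List of category path segments, e.g., ["Electronics", "Mobile Phones", "Smartphones"]
--
--     Returns:
--         Cash Converters category ID string or None
--     """
--     if not category_path or not isinstance(category_path, list):
--         return None
--
--     # Search from most specific (end of array) to most general (start)
--     for i in range(len(category_path) - 1, -1, -1):
--         segment = category_path[i].lower()
--         if segment in CASH_CONVERTERS_CATEGORY_MAP:
--             return CASH_CONVERTERS_CATEGORY_MAP[segment]
--
--     return None
-- ===== SOURCE B (Python) =====
-- CASH_CONVERTERS_CATEGORY_MAP = {
--     "phones": "9355",
--     "games": "139973",
--     "tablets": "58058",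
--     "laptops": "175672",
--     "gaming consoles": "139971",
--     "guitars & basses": "3858",
--     "smartphones and mobile": "9355",
--     "games (discs & cartridges)": "139973",
--     "cameras": "31388",
--     "headphones": "15052",
--     "smartwatches": "178893",
-- }
--
-- def resolve_cashconverters_category(category_path):
--     if not category_path or not isinstance(category_path, list):
--         return None
--     # Forward scan keeping the rightmost match: same result as A's reverse early-exit scan.
--     best = None
--     for segment in category_path:
--         hit = CASH_CONVERTERS_CATEGORY_MAP.get(segment.lower())
--         if hit is not None:
--             best = hit
--     return best
-- ===== Notes on version B (the rewrite author's own statement) =====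
-- stated objective: alternative
-- what changed: Replaced the reverse index loop with early return by a single forward scan that keeps a running 'best' (the rightmost match) and returns it after the loop.
import Mathlib
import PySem

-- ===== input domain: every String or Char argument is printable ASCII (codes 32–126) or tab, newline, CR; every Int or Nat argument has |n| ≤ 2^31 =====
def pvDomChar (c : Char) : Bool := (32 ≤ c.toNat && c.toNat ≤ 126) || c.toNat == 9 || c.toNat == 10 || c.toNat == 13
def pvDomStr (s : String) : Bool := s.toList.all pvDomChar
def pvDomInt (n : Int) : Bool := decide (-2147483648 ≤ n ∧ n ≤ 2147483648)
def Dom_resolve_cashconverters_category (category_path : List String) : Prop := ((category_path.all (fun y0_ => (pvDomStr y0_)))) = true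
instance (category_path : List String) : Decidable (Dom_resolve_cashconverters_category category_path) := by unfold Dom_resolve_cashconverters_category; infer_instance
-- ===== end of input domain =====

-- ===== PORT A =====
-- One honest line: B replaces A's reverse early-exit scan by a forward scan with a running-best accumulator (same result; objective: alternative).

def CASH_CONVERTERS_CATEGORY_MAP : PySem.Dict String String :=
  PySem.Dict.ofList [("phones", "9355"), ("games", "139973"), ("tablets", "58058"),
    ("laptops", "175672"), ("gaming consoles", "139971"), ("guitars & basses", "3858"),
    ("smartphones and mobile", "9355"), ("games (discs & cartridges)", "139973"),
    ("cameras", "31388"), ("headphones", "15052"), ("smartwatches", "178893")]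

-- A's loop 'for i in range(len-1,-1,-1): …' visits the segments right-to-left and
-- returns at the first map hit; ported as structural recursion over the reversed list.
def resolveALoop : List String → Option String
  | [] => none
  | seg :: rest =>
      match CASH_CONVERTERS_CATEGORY_MAP.get? (PySem.Str.lower seg) with
      | some v => some v
      | none => resolveALoop rest

def resolve_cashconverters_category (category_path : List String) : Option String :=
  if category_path = [] then none
  else resolveALoop category_path.reverse

-- ===== PORT B =====
def resolve_cashconverters_category_alt (category_path : List String) : Option String :=
  if category_path = [] then none
  else
    category_path.foldl
      (fun best segment =>
        match CASH_CONVERTERS_CATEGORY_MAP.get? (PySem.Str.lower segment) with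
        | some hit => some hit
        | none => best)
      none

-- ===== PRECONDITION & SPEC =====
def Spec_resolve_cashconverters_category (category_path : List String) (out : Option String) : Prop := out = resolve_cashconverters_category_alt category_path
instance (category_path : List String) (out : Option String) : Decidable (Spec_resolve_cashconverters_category category_path out) := by unfold Spec_resolve_cashconverters_category; infer_instance

-- ===== CLAIM (what is proved, stated in full; the proofs are below) =====
def Claim_equal_resolve_cashconverters_category : Prop := ∀ (category_path : List String), Dom_resolve_cashconverters_category category_path → Spec_resolve_cashconverters_category category_path (resolve_cashconverters_category category_path)

-- ===== LEMMAS AND PROOFS =====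

-- B's forward fold from any accumulator equals: A's reverse scan if it hits, else the accumulator.
theorem foldB_eq_aLoop (l : List String) (acc : Option String) :
    l.foldl
      (fun best segment =>
        match CASH_CONVERTERS_CATEGORY_MAP.get? (PySem.Str.lower segment) with
        | some hit => some hit
        | none => best)
      acc
    = match resolveALoop l.reverse with
      | some v => some v
      | none => acc := by
  induction l generalizing acc with
  | nil => simp [resolveALoop]
  | cons s t ih =>
      have hsnoc : ∀ (xs : List String) (a : Option String),
          resolveALoop (xs ++ [s])
          = match resolveALoop xs with
            | some v => some v
            | none => resolveALoop [s] := by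
        intro xs a
        induction xs with
        | nil => simp [resolveALoop]
        | cons y ys ihy =>
            simp only [List.cons_append, resolveALoop]
            cases CASH_CONVERTERS_CATEGORY_MAP.get? (PySem.Str.lower y) with
            | some v => rfl
            | none => exact ihy
      simp only [List.foldl_cons, List.reverse_cons, ih, hsnoc _ acc, resolveALoop]
      cases h : CASH_CONVERTERS_CATEGORY_MAP.get? (PySem.Str.lower s) <;>
        cases resolveALoop t.reverse <;> simp

-- ===== VERDICT (by name: the statement is the Claim_ definition above) =====
theorem resolve_cashconverters_category_spec : Claim_equal_resolve_cashconverters_category := by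
  intro category_path _
  unfold Spec_resolve_cashconverters_category resolve_cashconverters_category resolve_cashconverters_category_alt
  by_cases h : category_path = []
  · simp [h]
  · simp only [if_neg h, foldB_eq_aLoop]
    cases resolveALoop category_path.reverse <;> rfl
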